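-- pv_equiv track=rewrite | github.com/HaojiongZhang/tartanhack25 | dispute.py | _analyze_keywords
-- ===== SOURCE A (Python) =====
-- from typing import Dict, List, Optional, Any
--
-- def _analyze_keywords(
--
--     cases: List[Dict],
--     keywords: List[str]
-- ) -> Dict[str, int]:
--     """Analyze keyword frequency in cases"""
--     keyword_counts = {keyword: 0 for keyword in keywords}
--     for case in cases:
--         text = f"{case.get('case_name', '')} {case.get('description', '')}"
--         for keyword in keywords:
--             if keyword.lower() in text.lower():
--                 keyword_counts[keyword] += 1
--     return keyword_counts
-- ===== SOURCE B (Python) =====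
-- from typing import Dict, List
--
--
-- def _analyze_keywords(
--     cases: List[Dict],
--     keywords: List[str]
-- ) -> Dict[str, int]:
--     """Analyze keyword frequency in cases"""
--     counts = {kw: 0 for kw in keywords}
--     lens = {len(kw) for kw in keywords}
--     for case in cases:
--         text = "{} {}".format(case.get('case_name', ''),
--                               case.get('description', '')).lower()
--         # hash-set of every substring of text whose length is a keyword length:
--         # one membership probe per keyword replaces A's per-keyword substring scan
--         windows = set()
--         n = len(text)
--         for L in lens:
--             for i in range(n - L + 1):
--                 windows.add(text[i:i + L])
--         for kw in keywords:
--             if kw.lower() in windows: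
--                 counts[kw] += 1
--     return counts
-- ===== Notes on version B (the rewrite author's own statement) =====
-- stated objective: alternative
-- what changed: B builds, per case, a hash set of all substrings of the lowered text whose lengths are keyword lengths, so each keyword is tested by one set-membership probe instead of A's per-keyword substring scan of the re-lowered text.
import Mathlib
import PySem

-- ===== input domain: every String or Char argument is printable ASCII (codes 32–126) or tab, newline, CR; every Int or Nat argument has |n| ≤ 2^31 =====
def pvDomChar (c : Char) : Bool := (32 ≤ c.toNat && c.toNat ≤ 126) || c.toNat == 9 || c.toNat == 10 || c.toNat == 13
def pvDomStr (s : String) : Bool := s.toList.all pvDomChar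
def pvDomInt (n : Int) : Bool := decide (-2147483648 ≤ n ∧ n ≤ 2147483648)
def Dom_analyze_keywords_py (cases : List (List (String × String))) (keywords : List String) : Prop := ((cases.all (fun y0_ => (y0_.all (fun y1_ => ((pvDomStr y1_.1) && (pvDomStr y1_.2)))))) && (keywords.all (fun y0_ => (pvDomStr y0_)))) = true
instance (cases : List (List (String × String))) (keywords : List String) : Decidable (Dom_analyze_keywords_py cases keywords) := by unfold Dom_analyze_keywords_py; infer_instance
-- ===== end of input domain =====

-- ===== PORT A =====
-- B replaces A's per-keyword substring scan with one hash set of the text's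
-- relevant-length substrings per case, probed once per keyword; return-value
-- equivalence only (neither program mutates its arguments).

-- text = f"{case.get('case_name', '')} {case.get('description', '')}"  (shared by both ports)
def pvCaseText (case : List (String × String)) : String :=
  (PySem.Dict.mk case).getD "case_name" "" ++ " " ++ (PySem.Dict.mk case).getD "description" ""

def analyze_keywords_py (cases : List (List (String × String))) (keywords : List String) : List (String × Int) :=
  let init : PySem.Dict String Int := keywords.foldl (fun d k => d.insert k 0) PySem.Dict.empty
  let final := cases.foldl (fun d case =>
    let text := pvCaseText case
    keywords.foldl (fun d kw =>
      if PySem.Str.isIn (PySem.Str.lower kw) (PySem.Str.lower text)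
      then d.insert kw (d.getD kw 0 + 1) else d) d) init
  final.items

-- ===== PORT B =====
-- windows = {text[i:i+L] for L in lens for i in range(len(text)-L+1)}  (on the code-point list)
def pvWindows (t : List Char) (lens : List Int) : PySem.Set (List Char) :=
  lens.foldl (fun w L =>
    (PySem.List.pyRange 0 ((t.length : Int) - L + 1) 1).foldl
      (fun w i => PySem.Set.add w (PySem.List.slice t (some i) (some (i + L)))) w)
    PySem.Set.empty

def analyze_keywords_py_alt (cases : List (List (String × String))) (keywords : List String) : List (String × Int) :=
  let counts : PySem.Dict String Int := keywords.foldl (fun d k => d.insert k 0) PySem.Dict.empty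
  let lens : PySem.Set Int := PySem.Set.ofList (keywords.map PySem.Str.len)
  let final := cases.foldl (fun d case =>
    let text := (PySem.Str.lower (pvCaseText case)).toList
    let windows := pvWindows text lens
    keywords.foldl (fun d kw =>
      if PySem.Set.contains windows (PySem.Str.lower kw).toList
      then d.insert kw (d.getD kw 0 + 1) else d) d) counts
  final.items

-- ===== PRECONDITION & SPEC =====
def Spec_analyze_keywords_py (cases : List (List (String × String))) (keywords : List String) (out : List (String × Int)) : Prop := out = analyze_keywords_py_alt cases keywords
instance (cases : List (List (String × String))) (keywords : List String) (out : List (String × Int)) : Decidable (Spec_analyze_keywords_py cases keywords out) := by unfold Spec_analyze_keywords_py; infer_instance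

-- ===== CLAIM (what is proved, stated in full; the proofs are below) =====
def Claim_equal_analyze_keywords_py : Prop := ∀ (cases : List (List (String × String))) (keywords : List String), Dom_analyze_keywords_py cases keywords → Spec_analyze_keywords_py cases keywords (analyze_keywords_py cases keywords)

-- ===== LEMMAS AND PROOFS =====

-- membership in the window set: exactly the slices the two nested loops add
theorem pv_mem_windows_aux (t y : List Char) :
    ∀ (lens : List Int) (w : PySem.Set (List Char)),
      y ∈ lens.foldl (fun w L =>
            (PySem.List.pyRange 0 ((t.length : Int) - L + 1) 1).foldl
              (fun w i => PySem.Set.add w (PySem.List.slice t (some i) (some (i + L)))) w) w ↔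
        y ∈ w ∨ ∃ L ∈ lens, ∃ i : Int, 0 ≤ i ∧ i < (t.length : Int) - L + 1 ∧
          y = PySem.List.slice t (some i) (some (i + L)) := by
  intro lens
  induction lens with
  | nil => intro w; simp
  | cons L ls ih =>
    intro w
    rw [List.foldl_cons, ih, PySem.Set.mem_foldl_add]
    simp only [PySem.List.mem_pyRange_one, List.mem_cons]
    constructor
    · rintro ((hy | ⟨i, ⟨h0, hi⟩, rfl⟩) | ⟨M, hM, i, h0, hi, rfl⟩)
      · exact Or.inl hy
      · exact Or.inr ⟨L, Or.inl rfl, i, h0, hi, rfl⟩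
      · exact Or.inr ⟨M, Or.inr hM, i, h0, hi, rfl⟩
    · rintro (hy | ⟨M, rfl | hM, i, h0, hi, rfl⟩)
      · exact Or.inl (Or.inl hy)
      · exact Or.inl (Or.inr ⟨i, ⟨h0, hi⟩, rfl⟩)
      · exact Or.inr ⟨M, hM, i, h0, hi, rfl⟩

theorem pv_mem_windows (t : List Char) (lens : List Int) (y : List Char) :
    y ∈ pvWindows t lens ↔
      ∃ L ∈ lens, ∃ i : Int, 0 ≤ i ∧ i < (t.length : Int) - L + 1 ∧
        y = PySem.List.slice t (some i) (some (i + L)) := by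
  unfold pvWindows
  rw [pv_mem_windows_aux]
  simp [PySem.Set.empty]

-- a length-admissible word is in the window set iff it is an infix of the text
theorem pv_windows_iff_infix (t : List Char) (lens : List Int) (p : List Char)
    (hlen : (p.length : Int) ∈ lens) (hpos : ∀ L ∈ lens, 0 ≤ L) :
    p ∈ pvWindows t lens ↔ p <:+: t := by
  rw [pv_mem_windows]
  constructor
  · rintro ⟨L, hL, i, h0, _, rfl⟩
    rw [PySem.List.slice_toNat t h0 (by have := hpos L hL; omega)]
    exact ((List.take_prefix _ _).isInfix).trans (List.drop_suffix _ _).isInfix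
  · rintro ⟨pre, suf, rfl⟩
    refine ⟨(p.length : Int), hlen, (pre.length : Int), by positivity, by
      simp only [List.length_append]; push_cast; omega, ?_⟩
    rw [PySem.List.slice_natCast_add]
    rw [List.append_assoc, List.drop_left, List.take_left]

-- the per-(case, keyword) test: B's set probe equals A's substring scan
theorem pv_cond_eq (case : List (String × String)) (keywords : List String) (kw : String)
    (hkw : kw ∈ keywords) :
    PySem.Set.contains
        (pvWindows ((PySem.Str.lower (pvCaseText case)).toList)
          (PySem.Set.ofList (keywords.map PySem.Str.len)))
        (PySem.Str.lower kw).toList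
      = PySem.Str.isIn (PySem.Str.lower kw) (PySem.Str.lower (pvCaseText case)) := by
  rw [Bool.eq_iff_iff, PySem.Set.contains_iff, PySem.Str.isIn_iff_infix]
  rw [pv_windows_iff_infix]
  · rw [PySem.Set.mem_ofList, List.mem_map]
    refine ⟨kw, hkw, ?_⟩
    simp [PySem.Str.len, PySem.Str.toList_lower, PySem.Chars.lower]
  · intro L hL
    rw [PySem.Set.mem_ofList, List.mem_map] at hL
    obtain ⟨s, _, rfl⟩ := hL
    simp [PySem.Str.len]

-- ===== VERDICT (by name: the statement is the Claim_ definition above) =====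
theorem analyze_keywords_py_spec : Claim_equal_analyze_keywords_py := by
  intro cases keywords _hDom
  unfold Spec_analyze_keywords_py
  simp only [analyze_keywords_py, analyze_keywords_py_alt]
  refine congrArg PySem.Dict.items ?_
  apply PySem.List.foldl_congr_mem
  intro d case _
  apply PySem.List.foldl_congr_mem
  intro d' kw hkw
  rw [pv_cond_eq case keywords kw hkw]
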